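-- pv_equiv track=rewrite | github.com/ZhiliShen/Programmer-Code-Interview-Guide | 数组和矩阵问题/最长的可整合子数组的长度/test.py | get_longest_integrated_sequence_1
-- ===== SOURCE A (Python) =====
-- def quick_sort(array: list, start: int, end: int):
--     if end <= start:
--         return
--     mid = partition_1(array, start, end)
--     quick_sort(array, start, mid - 1)
--     quick_sort(array, mid + 1, end)
--
-- def partition_1(array: list, start: int, end: int):
--     flag = array[start]
--     i = start
--     j = end + 1
--     while True:
--         while True:
--             i += 1
--             if array[i] >= flag:
--                 break
--             if i == end:
--                 break
--         while True:
--             j -= 1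
--             if array[j] <= flag:
--                 break
--             if j == start:
--                 break
--         if i >= j:
--             break
--         array[i], array[j] = array[j], array[i]
--     array[start], array[j] = array[j], array[start]
--     return j
--
-- def get_longest_integrated_sequence_1(array: list):
--     if array is None or len(array) == 0:
--         return 0
--
--     res = 0
--     for i in range(len(array)):
--         for j in range(i, len(array)):
--             if valid_integrated_1(array, i, j):
--                 res = max(res, j - i + 1)
--
--     return res
--
-- def valid_integrated_1(array: list, start: int, end: int):
--     aux = []
--     for num in array[start:end + 1]:
--         aux.append(num)
--     quick_sort(aux, 0, len(aux) - 1)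
--     for i in range(1, len(aux)):
--         if aux[i] != aux[i - 1] + 1:
--             return False
--     return True
-- ===== SOURCE B (Python) =====
-- def get_longest_integrated_sequence_1(array):
--     if array is None or len(array) == 0:
--         return 0
--     n = len(array)
--     res = 0
--     for i in range(n):
--         seen = set()
--         mn = mx = array[i]
--         for j in range(i, n):
--             v = array[j]
--             if v in seen:
--                 break
--             seen.add(v)
--             if v < mn:
--                 mn = v
--             if v > mx:
--                 mx = v
--             if mx - mn == j - i:
--                 res = max(res, j - i + 1)
--     return res
-- ===== Notes on version B (the rewrite author's own statement) =====
-- stated objective: faster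
-- what changed: Instead of sorting every subarray with quicksort and scanning it for consecutiveness (O(n^3 log n)), B extends each window rightward once, maintaining a running min, max and a seen-set, using the fact that a window is integrable iff it has no duplicates and max-min equals its length minus 1 (and stopping at the first duplicate).
import Mathlib
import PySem

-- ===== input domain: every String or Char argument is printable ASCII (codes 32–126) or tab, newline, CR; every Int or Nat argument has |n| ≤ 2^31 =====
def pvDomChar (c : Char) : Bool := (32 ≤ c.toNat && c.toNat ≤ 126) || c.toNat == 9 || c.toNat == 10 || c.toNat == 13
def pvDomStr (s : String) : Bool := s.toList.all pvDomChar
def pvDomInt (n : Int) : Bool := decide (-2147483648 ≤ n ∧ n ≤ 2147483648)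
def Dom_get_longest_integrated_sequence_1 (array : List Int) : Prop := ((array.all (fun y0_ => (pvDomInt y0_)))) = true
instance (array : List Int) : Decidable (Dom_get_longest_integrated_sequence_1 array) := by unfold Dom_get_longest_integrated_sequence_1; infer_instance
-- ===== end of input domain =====

-- B replaces A's sort-every-subarray test (quicksort each window, then scan for consecutiveness)
-- by a single rightward extension per start index maintaining a running min, max and seen-set
-- (a window is integrable iff it has no duplicate and max - min = length - 1): objective = faster.

-- ===== PORT A =====
-- Python tuple swap 'array[i], array[j] = array[j], array[i]' (indices always in range at call sites)
def pySwapA (l : List Int) (i j : Nat) : List Int :=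
  (l.set i (l.getD j 0)).set j (l.getD i 0)

-- first inner while of partition_1: 'i += 1' until array[i] >= flag or i == end.
-- (the 'e ≤ i'' test is Python's 'i == end' break; i' > e is unreachable at call sites since i < e.)
def scanIA (l : List Int) (flag : Int) (e : Nat) (i : Nat) : Nat :=
  let i' := i + 1
  if flag ≤ l.getD i' 0 then i'
  else if e ≤ i' then i'
  else scanIA l flag e i'
termination_by e - i
decreasing_by omega

-- second inner while of partition_1: 'j -= 1' until array[j] <= flag or j == start.
def scanJA (l : List Int) (flag : Int) (s : Nat) (j : Nat) : Nat :=
  let j' := j - 1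
  if l.getD j' 0 ≤ flag then j'
  else if j' ≤ s then j'
  else scanJA l flag s j'
termination_by j
decreasing_by omega

theorem scanJA_le (l : List Int) (flag : Int) (s : Nat) (j : Nat) :
    scanJA l flag s j ≤ j - 1 := by
  unfold scanJA
  dsimp only
  split
  · omega
  · split
    · omega
    · have := scanJA_le l flag s (j - 1)
      omega
termination_by j
decreasing_by omega

-- the outer 'while True' of partition_1
def ploopA (l : List Int) (flag : Int) (s e : Nat) (i j : Nat) : List Int × Nat :=
  let i' := scanIA l flag e i
  let j' := scanJA l flag s j
  if j' ≤ i' then (l, j')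
  else ploopA (pySwapA l i' j') flag s e i' j'
termination_by j
decreasing_by
  have h1 := scanJA_le l flag s j
  omega

def partitionA (l : List Int) (s e : Nat) : List Int × Nat :=
  let flag := l.getD s 0
  let r := ploopA l flag s e s (e + 1)
  (pySwapA r.1 s r.2, r.2)

-- quick_sort; fuel is a totality guard only (recursion depth is at most e - s + 1 at every call site)
def quickSortA (fuel : Nat) (l : List Int) (s e : Int) : List Int :=
  match fuel with
  | 0 => l
  | f + 1 =>
    if e ≤ s then l
    else
      let r := partitionA l s.toNat e.toNat
      quickSortA f (quickSortA f r.1 s ((r.2 : Int) - 1)) ((r.2 : Int) + 1) e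

-- 'for i in range(1, len(aux)): if aux[i] != aux[i-1] + 1: return False'
def chainAuxA (aux : List Int) (i : Nat) : Bool :=
  if h : i < aux.length then
    if aux.getD i 0 ≠ aux.getD (i - 1) 0 + 1 then false
    else chainAuxA aux (i + 1)
  else true
termination_by aux.length - i

def valid_integrated_1 (array : List Int) (start fin : Nat) : Bool :=
  let aux := (PySem.List.slice array (some (start : Int)) (some ((fin : Int) + 1))).foldl
    (fun acc num => acc ++ [num]) []
  let sorted := quickSortA (aux.length + 1) aux 0 ((aux.length : Int) - 1)
  chainAuxA sorted 1

def get_longest_integrated_sequence_1 (array : List Int) : Int :=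
  if array.length = 0 then 0
  else
    (List.range array.length).foldl (fun res i =>
      (List.range' i (array.length - i)).foldl (fun res j =>
        if valid_integrated_1 array i j then max res ((j : Int) - (i : Int) + 1) else res) res) 0

-- ===== PORT B =====
-- inner 'for j in range(i, n)' loop of B, with early break on a duplicate
def innerB (array : List Int) (i : Nat) (j : Nat) (seen : PySem.Set Int) (mn mx res : Int) : Int :=
  if h : j < array.length then
    let v := array.getD j 0
    if PySem.Set.contains seen v then res
    else
      let seen' := PySem.Set.add seen v
      let mn' := if v < mn then v else mn
      let mx' := if mx < v then v else mx
      let res' := if mx' - mn' = (j : Int) - (i : Int) then max res ((j : Int) - (i : Int) + 1) else res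
      innerB array i (j + 1) seen' mn' mx' res'
  else res
termination_by array.length - j

def get_longest_integrated_sequence_1_alt (array : List Int) : Int :=
  if array.length = 0 then 0
  else
    (List.range array.length).foldl (fun res i =>
      innerB array i i PySem.Set.empty (array.getD i 0) (array.getD i 0) res) 0

-- ===== PRECONDITION & SPEC =====
def Spec_get_longest_integrated_sequence_1 (array : List Int) (out : Int) : Prop := out = get_longest_integrated_sequence_1_alt array
instance (array : List Int) (out : Int) : Decidable (Spec_get_longest_integrated_sequence_1 array out) := by unfold Spec_get_longest_integrated_sequence_1; infer_instance

-- ===== CLAIM (what is proved, stated in full; the proofs are below) =====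
def Claim_equal_get_longest_integrated_sequence_1 : Prop := ∀ (array : List Int), Dom_get_longest_integrated_sequence_1 array → Spec_get_longest_integrated_sequence_1 array (get_longest_integrated_sequence_1 array)

-- ===== LEMMAS AND PROOFS =====
theorem scanIA_spec (l : List Int) (flag : Int) (e : Nat) (i : Nat) (h : i < e) :
    i < scanIA l flag e i ∧ scanIA l flag e i ≤ e ∧
    (∀ k, i < k → k < scanIA l flag e i → l.getD k 0 < flag) ∧
    (flag ≤ l.getD (scanIA l flag e i) 0 ∨ scanIA l flag e i = e) := by
  fun_induction scanIA l flag e i with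
  | case1 i i' hle =>
    have e1 : i' = i + 1 := rfl; clear_value i'; subst e1
    refine ⟨by omega, by omega, ?_, Or.inl hle⟩; intro k hk1 hk2; omega
  | case2 i i' hlt hee =>
    have e1 : i' = i + 1 := rfl; clear_value i'; subst e1
    refine ⟨by omega, by omega, ?_, Or.inr (by omega)⟩; intro k hk1 hk2; omega
  | case3 i i' hlt hee ih =>
    have e1 : i' = i + 1 := rfl; clear_value i'; subst e1
    obtain ⟨ih1, ih2, ih3, ih4⟩ := ih (by omega)
    refine ⟨by omega, ih2, ?_, ih4⟩
    intro k hk1 hk2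
    rcases Nat.lt_or_ge k (i+1+1) with h' | h'
    · have : k = i + 1 := by omega
      subst this; omega
    · exact ih3 k (by omega) hk2
theorem scanJA_spec (l : List Int) (flag : Int) (s : Nat) (j : Nat) (h : s < j) :
    s ≤ scanJA l flag s j ∧ scanJA l flag s j < j ∧
    (∀ k, scanJA l flag s j < k → k < j → flag < l.getD k 0) ∧
    (l.getD (scanJA l flag s j) 0 ≤ flag ∨ scanJA l flag s j = s) := by
  fun_induction scanJA l flag s j with
  | case1 j j' hle =>
    have e1 : j' = j - 1 := rfl; clear_value j'; subst e1
    refine ⟨by omega, by omega, ?_, Or.inl hle⟩; intro k hk1 hk2; omega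
  | case2 j j' hgt hss =>
    have e1 : j' = j - 1 := rfl; clear_value j'; subst e1
    refine ⟨by omega, by omega, ?_, Or.inr (by omega)⟩; intro k hk1 hk2; omega
  | case3 j j' hgt hss ih =>
    have e1 : j' = j - 1 := rfl; clear_value j'; subst e1
    obtain ⟨ih1, ih2, ih3, ih4⟩ := ih (by omega)
    refine ⟨ih1, by omega, ?_, ih4⟩
    intro k hk1 hk2
    rcases Nat.lt_or_ge k (j - 1) with h' | h'
    · exact ih3 k hk1 h'
    · have : k = j - 1 := by omega
      subst this; omega

-- getD facts about pySwapA
theorem pySwapA_getD_of_ne (l : List Int) (i j k : Nat) (h1 : k ≠ i) (h2 : k ≠ j) :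
    (pySwapA l i j).getD k 0 = l.getD k 0 := by
  simp [pySwapA, List.getD_eq_getElem?_getD, List.getElem?_set_ne (Ne.symm h2),
    List.getElem?_set_ne (Ne.symm h1)]

theorem pySwapA_getD_right (l : List Int) (i j : Nat) (hj : j < l.length) :
    (pySwapA l i j).getD j 0 = l.getD i 0 := by
  simp [pySwapA, List.getD_eq_getElem?_getD, hj]

theorem pySwapA_getD_left (l : List Int) (i j : Nat) (hi : i < l.length) (hij : i ≠ j) :
    (pySwapA l i j).getD i 0 = l.getD j 0 := by
  simp [pySwapA, List.getD_eq_getElem?_getD, (Ne.symm hij), hi]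

theorem pySwapA_perm (l : List Int) (i j : Nat) (hi : i < l.length) (hj : j < l.length) :
    (pySwapA l i j).Perm l := by
  have h := Array.swap_perm (xs := l.toArray) (i := i) (j := j) (by simpa) (by simpa)
  have e : (l.toArray.swap i j (by simpa) (by simpa)).toList = pySwapA l i j := by
    simp [pySwapA, Array.swap, List.getD_eq_getElem?_getD, List.getElem?_eq_getElem hi,
      List.getElem?_eq_getElem hj]
  rw [← e]
  exact List.Perm.of_toArray_perm (by simpa using h)

theorem pySwapA_length (l : List Int) (i j : Nat) :
    (pySwapA l i j).length = l.length := by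
  simp [pySwapA]

theorem pySwapA_take (l : List Int) (i j m : Nat) (hi : m ≤ i) (hj : m ≤ j) :
    (pySwapA l i j).take m = l.take m := by
  simp [pySwapA, List.take_set_of_le hj, List.take_set_of_le hi]

theorem pySwapA_drop (l : List Int) (i j m : Nat) (hi : i < m) (hj : j < m) :
    (pySwapA l i j).drop m = l.drop m := by
  simp [pySwapA, List.drop_set_of_lt hj, List.drop_set_of_lt hi]
theorem ploopA_spec (flag : Int) (s e : Nat) (l : List Int) (i j : Nat) :
    s ≤ i → i < e → i < j → j ≤ e + 1 → e < l.length → l.getD s 0 = flag →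
    (∀ k, s < k → k ≤ i → l.getD k 0 ≤ flag) →
    (∀ k, j ≤ k → k ≤ e → flag ≤ l.getD k 0) →
    (ploopA l flag s e i j).1.length = l.length ∧
    (ploopA l flag s e i j).1.Perm l ∧
    (ploopA l flag s e i j).1.take (s+1) = l.take (s+1) ∧
    (ploopA l flag s e i j).1.drop (e+1) = l.drop (e+1) ∧
    (ploopA l flag s e i j).1.getD s 0 = flag ∧
    s ≤ (ploopA l flag s e i j).2 ∧ (ploopA l flag s e i j).2 ≤ e ∧
    (∀ k, s ≤ k → k ≤ (ploopA l flag s e i j).2 → (ploopA l flag s e i j).1.getD k 0 ≤ flag) ∧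
    (∀ k, (ploopA l flag s e i j).2 < k → k ≤ e → flag ≤ (ploopA l flag s e i j).1.getD k 0) := by
  fun_induction ploopA l flag s e i j with
  | case1 l i j i' j' hbrk =>
    have ei : i' = scanIA l flag e i := rfl
    have ej : j' = scanJA l flag s j := rfl
    clear_value i' j'
    intro hsi hie hij hje hel hfl hleft hright
    obtain ⟨hI1, hI2, hI3, hI4⟩ := ei ▸ scanIA_spec l flag e i hie
    obtain ⟨hJ1, hJ2, hJ3, hJ4⟩ := ej ▸ scanJA_spec l flag s j (by omega)
    have hjflag : l.getD j' 0 ≤ flag := by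
      rcases hJ4 with h | h
      · exact h
      · rw [h, hfl]
    refine ⟨rfl, List.Perm.refl l, rfl, rfl, hfl, hJ1, by omega, ?_, ?_⟩
    · intro k hk1 hk2
      rcases Nat.eq_or_lt_of_le hk1 with h | h
      · rw [← h, hfl]
      · rcases Nat.lt_or_ge i k with h2 | h2
        · rcases Nat.lt_or_ge k i' with h3 | h3
          · exact le_of_lt (hI3 k h2 h3)
          · have hk : k = j' := by dsimp only at hk2; omega
            rw [hk]; exact hjflag
        · exact hleft k h h2
    · intro k hk1 hk2
      rcases Nat.lt_or_ge k j with h2 | h2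
      · exact le_of_lt (hJ3 k hk1 h2)
      · exact hright k h2 hk2
  | case2 l i j i' j' hbrk ih =>
    have ei : i' = scanIA l flag e i := rfl
    have ej : j' = scanJA l flag s j := rfl
    clear_value i' j'
    intro hsi hie hij hje hel hfl hleft hright
    obtain ⟨hI1, hI2, hI3, hI4⟩ := ei ▸ scanIA_spec l flag e i hie
    obtain ⟨hJ1, hJ2, hJ3, hJ4⟩ := ej ▸ scanJA_spec l flag s j (by omega)
    have hij' : i' < j' := by omega
    have hj'e : j' ≤ e := by omega
    have hi'e : i' < e := by omega
    have hi'len : i' < l.length := by omega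
    have hj'len : j' < l.length := by omega
    have hsne : s < i' := by omega
    have hsj' : s < j' := by omega
    have hiflag : flag ≤ l.getD i' 0 := by
      rcases hI4 with h | h
      · exact h
      · omega
    have hjflag : l.getD j' 0 ≤ flag := by
      rcases hJ4 with h | h
      · exact h
      · omega
    set l2 := pySwapA l i' j' with hl2
    obtain ⟨ih1, ih2, ih3, ih4, ih5, ih6, ih7, ih8, ih9⟩ := ih
      (by omega) hi'e hij' (by omega)
      (by rw [pySwapA_length]; omega)
      (by rw [pySwapA_getD_of_ne l i' j' s (by omega) (by omega)]; exact hfl)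
      (by
        intro k hk1 hk2
        rcases Nat.eq_or_lt_of_le hk2 with h | h
        · rw [h, pySwapA_getD_left l i' j' hi'len (by omega)]
          exact hjflag
        · rw [pySwapA_getD_of_ne l i' j' k (by omega) (by omega)]
          rcases Nat.lt_or_ge i k with h2 | h2
          · exact le_of_lt (hI3 k h2 h)
          · exact hleft k hk1 h2)
      (by
        intro k hk1 hk2
        rcases Nat.eq_or_lt_of_le hk1 with h | h
        · rw [← h, pySwapA_getD_right l i' j' hj'len]
          exact hiflag
        · rw [pySwapA_getD_of_ne l i' j' k (by omega) (by omega)]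
          rcases Nat.lt_or_ge k j with h2 | h2
          · exact le_of_lt (hJ3 k h h2)
          · exact hright k h2 hk2)
    refine ⟨by rw [ih1, pySwapA_length], ih2.trans (pySwapA_perm l i' j' hi'len hj'len),
      ih3.trans (pySwapA_take l i' j' (s+1) (by omega) (by omega)),
      ih4.trans (pySwapA_drop l i' j' (e+1) (by omega) (by omega)),
      ih5, ih6, ih7, ih8, ih9⟩
theorem take_eq_mono (l1 l2 : List Int) (m n : Nat) (h : m ≤ n)
    (he : l1.take n = l2.take n) : l1.take m = l2.take m := by
  rw [← Nat.min_eq_left h, ← List.take_take, he, List.take_take]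

theorem drop_eq_mono (l1 l2 : List Int) (m n : Nat) (h : m ≤ n)
    (he : l1.drop m = l2.drop m) : l1.drop n = l2.drop n := by
  calc l1.drop n = (l1.drop m).drop (n - m) := by rw [List.drop_drop]; congr 1; omega
    _ = (l2.drop m).drop (n - m) := by rw [he]
    _ = l2.drop n := by rw [List.drop_drop]; congr 1; omega

theorem getD_eq_of_take_eq (l1 l2 : List Int) (k n : Nat) (h : k < n)
    (he : l1.take n = l2.take n) : l1.getD k 0 = l2.getD k 0 := by
  rw [List.getD_eq_getElem?_getD, List.getD_eq_getElem?_getD,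
    ← List.getElem?_take_of_lt (l := l1) h, ← List.getElem?_take_of_lt (l := l2) h, he]

theorem getD_eq_of_drop_eq (l1 l2 : List Int) (k n : Nat) (h : n ≤ k)
    (he : l1.drop n = l2.drop n) : l1.getD k 0 = l2.getD k 0 := by
  have h1 : k = n + (k - n) := by omega
  rw [List.getD_eq_getElem?_getD, List.getD_eq_getElem?_getD, h1,
    ← List.getElem?_drop (xs := l1), ← List.getElem?_drop (xs := l2), he]

theorem middle_perm (l1 l2 : List Int) (a b : Nat) (hab : a ≤ b)
    (hp : l1.Perm l2) (ht : l1.take a = l2.take a) (hd : l1.drop b = l2.drop b) :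
    ((l1.take b).drop a).Perm ((l2.take b).drop a) := by
  have h1 : (l1.take b ++ l1.drop b).Perm (l2.take b ++ l2.drop b) := by
    simpa using hp
  rw [hd] at h1
  have h2 : (l1.take b).Perm (l2.take b) := (List.perm_append_right_iff _).mp h1
  have h3 : (l1.take b).take a = (l2.take b).take a := by
    rw [List.take_take, List.take_take, Nat.min_eq_left hab, ht]
  have h4 : ((l1.take b).take a ++ (l1.take b).drop a).Perm
      ((l2.take b).take a ++ (l2.take b).drop a) := by simpa using h2
  rw [h3] at h4
  exact (List.perm_append_left_iff _).mp h4

theorem getD_mem_seg (l : List Int) (a b k : Nat) (hk : k < l.length)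
    (h1 : a ≤ k) (h2 : k < b) : l.getD k 0 ∈ (l.take b).drop a := by
  have hkl : k - a < ((l.take b).drop a).length := by
    simp [List.length_drop, List.length_take]; omega
  have : ((l.take b).drop a)[k - a] = l.getD k 0 := by
    rw [List.getElem_drop, List.getElem_take, List.getD_eq_getElem _ _ hk]
    congr 1; omega
  rw [← this]
  exact List.getElem_mem hkl

theorem mem_seg_exists (l : List Int) (a b : Nat) (x : Int)
    (hx : x ∈ (l.take b).drop a) :
    ∃ k, a ≤ k ∧ k < b ∧ k < l.length ∧ l.getD k 0 = x := by
  obtain ⟨m, hm, he⟩ := List.getElem_of_mem hx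
  refine ⟨a + m, by omega, ?_, ?_, ?_⟩
  · have := hm; simp [List.length_drop, List.length_take] at this; omega
  · have := hm; simp [List.length_drop, List.length_take] at this; omega
  · rw [← he, List.getElem_drop, List.getElem_take]
    rw [List.getD_eq_getElem]

theorem partitionA_spec (l : List Int) (s e : Nat) (hse : s < e) (hel : e < l.length) :
    (partitionA l s e).1.length = l.length ∧
    (partitionA l s e).1.Perm l ∧
    (partitionA l s e).1.take s = l.take s ∧
    (partitionA l s e).1.drop (e+1) = l.drop (e+1) ∧
    s ≤ (partitionA l s e).2 ∧ (partitionA l s e).2 ≤ e ∧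
    (∀ k, s ≤ k → k < (partitionA l s e).2 →
      (partitionA l s e).1.getD k 0 ≤ (partitionA l s e).1.getD (partitionA l s e).2 0) ∧
    (∀ k, (partitionA l s e).2 < k → k ≤ e →
      (partitionA l s e).1.getD (partitionA l s e).2 0 ≤ (partitionA l s e).1.getD k 0) := by
  obtain ⟨h1, h2, h3, h4, h5, h6, h7, h8, h9⟩ :=
    ploopA_spec (l.getD s 0) s e l s (e+1) (le_refl s) hse (by omega) (le_refl _) hel rfl
      (by intro k hk1 hk2; omega) (by intro k hk1 hk2; omega)
  set r := ploopA l (l.getD s 0) s e s (e+1) with hr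
  obtain ⟨l', p⟩ := r
  simp only at h1 h2 h3 h4 h5 h6 h7 h8 h9 ⊢
  have hres : partitionA l s e = (pySwapA l' s p, p) := by
    rw [partitionA, ← hr]
  rw [hres]
  simp only
  have hplen : p < l'.length := by omega
  have hslen : s < l'.length := by omega
  have hpivot : (pySwapA l' s p).getD p 0 = l.getD s 0 := by
    rw [pySwapA_getD_right l' s p hplen, h5]
  refine ⟨by rw [pySwapA_length, h1], (pySwapA_perm l' s p hslen hplen).trans h2, ?_, ?_, h6, h7, ?_, ?_⟩
  · rw [pySwapA_take l' s p s (le_refl s) h6]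
    exact take_eq_mono l' l s (s+1) (by omega) h3
  · rw [pySwapA_drop l' s p (e+1) (by omega) (by omega), h4]
  · intro k hk1 hk2
    rw [hpivot]
    rcases Nat.eq_or_lt_of_le hk1 with h | h
    · rw [← h, pySwapA_getD_left l' s p hslen (by omega)]
      exact h8 p (by omega) (le_refl p)
    · rw [pySwapA_getD_of_ne l' s p k (by omega) (by omega)]
      exact h8 k (by omega) (by omega)
  · intro k hk1 hk2
    rw [hpivot, pySwapA_getD_of_ne l' s p k (by omega) (by omega)]
    exact h9 k hk1 hk2
theorem quickSortA_spec (fuel : Nat) : ∀ (l : List Int) (s e : Int), 0 ≤ s →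
    e < (l.length : Int) → e - s + 1 ≤ (fuel : Int) →
    (quickSortA fuel l s e).length = l.length ∧
    (quickSortA fuel l s e).Perm l ∧
    (quickSortA fuel l s e).take s.toNat = l.take s.toNat ∧
    (quickSortA fuel l s e).drop (e+1).toNat = l.drop (e+1).toNat ∧
    (∀ k1 k2 : Nat, s ≤ (k1 : Int) → k1 ≤ k2 → (k2 : Int) ≤ e →
      (quickSortA fuel l s e).getD k1 0 ≤ (quickSortA fuel l s e).getD k2 0) := by
  induction fuel with
  | zero =>
    intro l s e hs he hf
    refine ⟨rfl, List.Perm.refl l, rfl, rfl, ?_⟩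
    intro k1 k2 h1 h2 h3
    omega
  | succ f ih =>
    intro l s e hs he hf
    by_cases h : e ≤ s
    · rw [quickSortA, if_pos h]
      refine ⟨rfl, List.Perm.refl l, rfl, rfl, ?_⟩
      intro k1 k2 h1 h2 h3
      have : k1 = k2 := by omega
      subst this; exact le_refl _
    · have hq : quickSortA (f+1) l s e =
          quickSortA f (quickSortA f (partitionA l s.toNat e.toNat).1 s
            (((partitionA l s.toNat e.toNat).2 : Int) - 1))
            (((partitionA l s.toNat e.toNat).2 : Int) + 1) e := by
        rw [quickSortA, if_neg h]
      rw [hq]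
      obtain ⟨P1, P2, P3, P4, P5, P6, P7, P8⟩ :=
        partitionA_spec l s.toNat e.toNat (by omega) (by omega)
      set l2 := (partitionA l s.toNat e.toNat).1 with hl2
      set p := (partitionA l s.toNat e.toNat).2 with hp
      obtain ⟨Q1, Q2, Q3, Q4, Q5⟩ := ih l2 s ((p : Int) - 1) hs (by omega) (by omega)
      set l3 := quickSortA f l2 s ((p : Int) - 1) with hl3
      obtain ⟨R1, R2, R3, R4, R5⟩ := ih l3 ((p : Int) + 1) e (by omega) (by omega) (by omega)
      set l4 := quickSortA f l3 ((p : Int) + 1) e with hl4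
      -- normalize index casts
      have eQ4 : l3.drop p = l2.drop p := by
        have : ((p : Int) - 1 + 1).toNat = p := by omega
        rwa [this] at Q4
      have eR3 : l4.take (p + 1) = l3.take (p + 1) := by
        have : ((p : Int) + 1).toNat = p + 1 := by omega
        rwa [this] at R3
      have eE1 : (e + 1).toNat = e.toNat + 1 := by omega
      have hL3p : ∀ k, p ≤ k → l3.getD k 0 = l2.getD k 0 := fun k hk =>
        getD_eq_of_drop_eq l3 l2 k p hk eQ4
      have hL4le : ∀ k, k ≤ p → l4.getD k 0 = l3.getD k 0 := fun k hk =>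
        getD_eq_of_take_eq l4 l3 k (p + 1) (by omega) eR3
      have hpiv : l4.getD p 0 = l2.getD p 0 := by rw [hL4le p (le_refl p), hL3p p (le_refl p)]
      have hleftb : ∀ k, s.toNat ≤ k → k < p → l4.getD k 0 ≤ l2.getD p 0 := by
        intro k hk1 hk2
        rw [hL4le k (by omega)]
        have hmem : l3.getD k 0 ∈ (l3.take p).drop s.toNat :=
          getD_mem_seg l3 s.toNat p k (by omega) hk1 hk2
        have hperm := middle_perm l3 l2 s.toNat p (by omega) Q2 Q3 eQ4
        obtain ⟨k', hk'1, hk'2, hk'3, hk'4⟩ :=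
          mem_seg_exists l2 s.toNat p _ (hperm.mem_iff.mp hmem)
        rw [← hk'4]
        exact P7 k' hk'1 hk'2
      have hrightb : ∀ k, p < k → k ≤ e.toNat → l2.getD p 0 ≤ l4.getD k 0 := by
        intro k hk1 hk2
        have hmem : l4.getD k 0 ∈ (l4.take (e.toNat + 1)).drop (p + 1) :=
          getD_mem_seg l4 (p + 1) (e.toNat + 1) k (by omega) (by omega) (by omega)
        have eR4 : l4.drop (e.toNat + 1) = l3.drop (e.toNat + 1) := by rwa [eE1] at R4
        have hperm := middle_perm l4 l3 (p + 1) (e.toNat + 1) (by omega) R2 eR3 eR4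
        obtain ⟨k', hk'1, hk'2, hk'3, hk'4⟩ :=
          mem_seg_exists l3 (p + 1) (e.toNat + 1) _ (hperm.mem_iff.mp hmem)
        rw [← hk'4, hL3p k' (by omega)]
        exact P8 k' (by omega) (by omega)
      refine ⟨by rw [R1, Q1, P1], (R2.trans Q2).trans P2, ?_, ?_, ?_⟩
      · calc l4.take s.toNat = l3.take s.toNat := take_eq_mono l4 l3 s.toNat (p + 1) (by omega) eR3
          _ = l2.take s.toNat := Q3
          _ = l.take s.toNat := P3
      · calc l4.drop (e+1).toNat = l3.drop (e+1).toNat := R4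
          _ = l2.drop (e+1).toNat := by
              rw [eE1]; exact drop_eq_mono l3 l2 p (e.toNat + 1) (by omega) eQ4
          _ = l.drop (e+1).toNat := by rw [eE1]; exact P4
      · intro k1 k2 h1 h2 h3
        rcases Nat.lt_trichotomy k1 p with hc1 | hc1 | hc1
        · rcases Nat.lt_trichotomy k2 p with hc2 | hc2 | hc2
          · rw [hL4le k1 (by omega), hL4le k2 (by omega)]
            exact Q5 k1 k2 h1 h2 (by omega)
          · rw [hc2, hpiv]; exact hleftb k1 (by omega) hc1
          · exact le_trans (hleftb k1 (by omega) hc1) (hrightb k2 hc2 (by omega))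
        · subst hc1
          rcases Nat.eq_or_lt_of_le h2 with hc2 | hc2
          · rw [← hc2]
          · rw [hpiv]; exact hrightb k2 hc2 (by omega)
        · exact R5 k1 k2 (by omega) h2 h3
def runL (m : Int) (k : Nat) : List Int := (List.range k).map (fun t : Nat => m + (t : Int))

def segN (l : List Int) (i n : Nat) : List Int := (l.drop i).take n

def goodW (l : List Int) (i j : Nat) : Bool :=
  decide (segN l i (j + 1 - i)).Nodup &&
  ((segN l i (j + 1 - i)).foldl max (l.getD i 0) -
   (segN l i (j + 1 - i)).foldl min (l.getD i 0) == (j : Int) - (i : Int))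

theorem runL_length (m : Int) (k : Nat) : (runL m k).length = k := by simp [runL]

theorem runL_getD (m : Int) (k t : Nat) (h : t < k) : (runL m k).getD t 0 = m + t := by
  have hsome : (runL m k)[t]? = some (m + t) := by
    simp [runL, List.getElem?_map, List.getElem?_range h]
  simp [List.getD_eq_getElem?_getD, hsome]

theorem runL_nodup (m : Int) (k : Nat) : (runL m k).Nodup := by
  refine List.Nodup.map ?_ (List.nodup_range)
  intro a b hab
  simp only at hab
  omega

theorem runL_mem (m : Int) (k : Nat) (x : Int) : x ∈ runL m k ↔ ∃ t : Nat, t < k ∧ x = m + t := by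
  simp [runL]
  constructor
  · rintro ⟨t, ht, rfl⟩; exact ⟨t, ht, rfl⟩
  · rintro ⟨t, ht, rfl⟩; exact ⟨t, ht, rfl⟩

theorem runL_pairwise (m : Int) (k : Nat) : (runL m k).Pairwise (· ≤ ·) := by
  rw [List.pairwise_iff_getElem]
  intro a b ha hb hab
  simp only [runL, List.getElem_map, List.getElem_range]
  simp [runL] at ha hb
  omega

theorem segN_length (l : List Int) (i n : Nat) (h : i + n ≤ l.length) :
    (segN l i n).length = n := by
  simp [segN]; omega

theorem segN_getD (l : List Int) (i n t : Nat) (ht : t < n) (hlen : i + t < l.length) :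
    (segN l i n).getD t 0 = l.getD (i + t) 0 := by
  simp [segN, List.getD_eq_getElem?_getD, List.getElem?_take_of_lt ht, List.getElem?_drop]

theorem segN_snoc (l : List Int) (i n : Nat) (h : i + n < l.length) :
    segN l i (n + 1) = segN l i n ++ [l.getD (i + n) 0] := by
  simp only [segN, List.take_add_one]
  congr 1
  have : (l.drop i)[n]? = some (l.getD (i + n) 0) := by
    rw [List.getElem?_drop, List.getD_eq_getElem?_getD, List.getElem?_eq_getElem h]
    rfl
  rw [this]
  rfl

theorem segN_prefix (l : List Int) (i n n' : Nat) (h : n ≤ n') :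
    segN l i n = (segN l i n').take n := by
  simp [segN, List.take_take, Nat.min_eq_left h]

theorem segN_zero (l : List Int) (i : Nat) : segN l i 0 = [] := by simp [segN]

theorem getD_mem_segN (l : List Int) (i n t : Nat) (ht : t < n) (hlen : i + t < l.length) :
    l.getD (i + t) 0 ∈ segN l i n := by
  rw [← segN_getD l i n t ht hlen]
  have hlt : t < (segN l i n).length := by simp [segN]; omega
  rw [List.getD_eq_getElem _ _ hlt]
  exact List.getElem_mem hlt

-- the pigeonhole characterization: nodup + (max - min = len - 1)  ↔  a permutation of a run
theorem good_iff_run (w : List Int) (a : Int) (ha : a ∈ w) (k : Nat) (hk : w.length = k) :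
    (w.Nodup ∧ w.foldl max a - w.foldl min a = (k : Int) - 1) ↔ ∃ m, w.Perm (runL m k) := by
  have hk1 : 1 ≤ k := by
    rcases w with _ | ⟨x, t⟩
    · simp at ha
    · simp at hk; omega
  constructor
  · rintro ⟨hnd, hmm⟩
    set mn := w.foldl min a with hmn
    set mx := w.foldl max a with hmx
    have hmnw : mn ∈ w := by
      rcases PySem.List.foldl_min_mem w a with h | h
      · rw [hmn, h]; exact ha
      · exact h
    have hbounds : ∀ x ∈ w, mn ≤ x ∧ x ≤ mx :=
      fun x hx => ⟨(PySem.List.foldl_min_le w a).2 x hx, (PySem.List.le_foldl_max w a).2 x hx⟩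
    refine ⟨mn, ?_⟩
    have hToF : w.toFinset = (runL mn k).toFinset := by
      have hsub : w.toFinset ⊆ Finset.Icc mn mx := by
        intro x hx
        rw [List.mem_toFinset] at hx
        rw [Finset.mem_Icc]
        exact hbounds x hx
      have hrun : (runL mn k).toFinset = Finset.Icc mn mx := by
        ext x
        rw [List.mem_toFinset, runL_mem, Finset.mem_Icc]
        constructor
        · rintro ⟨t, ht, rfl⟩; omega
        · rintro ⟨h1, h2⟩; exact ⟨(x - mn).toNat, by omega, by omega⟩
      rw [hrun]
      refine Finset.eq_of_subset_of_card_le hsub ?_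
      rw [Int.card_Icc, List.toFinset_card_of_nodup hnd, hk]
      omega
    exact List.perm_of_nodup_nodup_toFinset_eq hnd (runL_nodup mn k) hToF
  · rintro ⟨m, hperm⟩
    have hnd : w.Nodup := hperm.nodup_iff.mpr (runL_nodup m k)
    refine ⟨hnd, ?_⟩
    have hmemw : ∀ x ∈ w, m ≤ x ∧ x ≤ m + (k : Int) - 1 := by
      intro x hx
      have := hperm.mem_iff.mp hx
      rw [runL_mem] at this
      obtain ⟨t, ht, rfl⟩ := this
      omega
    have hmw : m ∈ w := by
      rw [hperm.mem_iff, runL_mem]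
      exact ⟨0, by omega, by omega⟩
    have hMw : m + (k : Int) - 1 ∈ w := by
      rw [hperm.mem_iff, runL_mem]
      exact ⟨k - 1, by omega, by omega⟩
    have h1 : w.foldl min a ≤ m := (PySem.List.foldl_min_le w a).2 m hmw
    have h2 : m + (k : Int) - 1 ≤ w.foldl max a := (PySem.List.le_foldl_max w a).2 _ hMw
    have h3 : w.foldl min a ∈ w := by
      rcases PySem.List.foldl_min_mem w a with h | h
      · rw [h]; exact ha
      · exact h
    have h4 : w.foldl max a ∈ w := by
      rcases PySem.List.foldl_max_mem w a with h | h
      · rw [h]; exact ha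
      · exact h
    have h5 := hmemw _ h3
    have h6 := hmemw _ h4
    omega

-- characterization of the consecutive-check loop on the sorted copy
theorem chainAuxA_iff (y : List Int) : ∀ i : Nat, chainAuxA y i = true ↔
    ∀ t, i ≤ t → t < y.length → y.getD t 0 = y.getD (t - 1) 0 + 1 := by
  intro i
  fun_induction chainAuxA y i with
  | case1 i hlt hne =>
    exact ⟨fun h => absurd h Bool.false_ne_true,
      fun hall => absurd (hall i (le_refl i) hlt) hne⟩
  | case2 i hlt hne ih =>
    rw [ih]
    push_neg at hne
    constructor
    · intro hall t ht1 ht2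
      rcases Nat.eq_or_lt_of_le ht1 with h | h
      · rw [← h]; exact hne
      · exact hall t h ht2
    · intro hall t ht1 ht2
      exact hall t (by omega) ht2
  | case3 i hge =>
    refine ⟨fun _ t ht1 ht2 => by omega, fun _ => rfl⟩

theorem chain_iff_run (y : List Int) (hy : 0 < y.length) :
    (∀ t, 1 ≤ t → t < y.length → y.getD t 0 = y.getD (t - 1) 0 + 1) ↔
    y = runL (y.getD 0 0) y.length := by
  constructor
  · intro hall
    have hstep : ∀ t, t < y.length → y.getD t 0 = y.getD 0 0 + t := by
      intro t
      induction t with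
      | zero => intro _; simp
      | succ n ihn =>
        intro ht
        rw [hall (n + 1) (by omega) ht]
        rw [show n + 1 - 1 = n from rfl, ihn (by omega)]
        push_cast; ring
    apply List.ext_getElem
    · rw [runL_length]
    · intro t ht1 ht2
      have e1 : y[t] = y.getD t 0 := (List.getD_eq_getElem y 0 ht1).symm
      have e2 : (runL (y.getD 0 0) y.length)[t] = (runL (y.getD 0 0) y.length).getD t 0 :=
        (List.getD_eq_getElem _ 0 ht2).symm
      rw [e1, e2, runL_getD _ _ _ ht1, hstep t ht1]
  · intro hrun t ht1 ht2
    have e1 : y.getD t 0 = y.getD 0 0 + (t : Int) := by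
      conv_lhs => rw [hrun]
      rw [runL_getD _ _ _ ht2]
    have e2 : y.getD (t - 1) 0 = y.getD 0 0 + ((t : Int) - 1) := by
      conv_lhs => rw [hrun]
      rw [runL_getD _ _ _ (by omega)]
      have hc : ((t - 1 : Nat) : Int) = (t : Int) - 1 := by omega
      rw [hc]
    rw [e1, e2]
    ring
theorem valid_iff (l : List Int) (i j : Nat) (hij : i ≤ j) (hjl : j < l.length) :
    valid_integrated_1 l i j = goodW l i j := by
  have hseg_len : (segN l i (j + 1 - i)).length = j + 1 - i :=
    segN_length l i (j + 1 - i) (by omega)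
  set w := segN l i (j + 1 - i) with hw
  have hk1 : 1 ≤ w.length := by omega
  have haux : (PySem.List.slice l (some (i : Int)) (some ((j : Int) + 1))).foldl
      (fun acc num => acc ++ [num]) [] = w := by
    rw [PySem.List.foldl_append_singleton]
    have hcast : ((j : Int) + 1) = ((j + 1 : Nat) : Int) := by push_cast; ring
    rw [hcast, PySem.List.slice_natCast]
    simp [hw, segN]
  have hbody : valid_integrated_1 l i j =
      chainAuxA (quickSortA (w.length + 1) w 0 ((w.length : Int) - 1)) 1 := by
    unfold valid_integrated_1
    rw [haux]
  obtain ⟨ylen, yperm, _, _, ysort⟩ := quickSortA_spec (w.length + 1) w 0 ((w.length : Int) - 1)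
    (le_refl 0) (by omega) (by push_cast; omega)
  set y := quickSortA (w.length + 1) w 0 ((w.length : Int) - 1) with hy
  have ypair : y.Pairwise (· ≤ ·) := by
    rw [List.pairwise_iff_getElem]
    intro a b ha hb hab
    have hs := ysort a b (by omega) (by omega) (by omega)
    rwa [List.getD_eq_getElem _ _ ha, List.getD_eq_getElem _ _ hb] at hs
  have ha0 : l.getD i 0 ∈ w := by
    have := getD_mem_segN l i (j + 1 - i) 0 (by omega) (by omega)
    simpa using this
  have hgw : goodW l i j = true ↔
      (w.Nodup ∧ w.foldl max (l.getD i 0) - w.foldl min (l.getD i 0) = (w.length : Int) - 1) := by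
    have hc : (j : Int) - (i : Int) = (w.length : Int) - 1 := by omega
    rw [goodW, ← hw, hc]
    simp [Bool.and_eq_true, beq_iff_eq, decide_eq_true_iff]
  rw [hbody, Bool.eq_iff_iff, chainAuxA_iff y 1, chain_iff_run y (by omega), hgw,
    good_iff_run w (l.getD i 0) ha0 w.length rfl]
  constructor
  · intro hyr
    exact ⟨y.getD 0 0, yperm.symm.trans (by rw [← ylen, ← hyr])⟩
  · rintro ⟨m, hwm⟩
    have hyr : y.Perm (runL m w.length) := yperm.trans hwm
    have hEq : y = runL m w.length :=
      List.Perm.eq_of_pairwise (fun a b _ _ h1 h2 => le_antisymm h1 h2) ypair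
        (runL_pairwise m w.length) hyr
    rw [hEq, runL_length, runL_getD m w.length 0 (by omega)]
    norm_num
theorem goodW_false_of_dup (l : List Int) (i j j' : Nat) (hjj : j ≤ j')
    (hdup : ¬ (segN l i (j + 1 - i)).Nodup) : goodW l i j' = false := by
  have hpre : segN l i (j + 1 - i) = (segN l i (j' + 1 - i)).take (j + 1 - i) :=
    segN_prefix l i (j + 1 - i) (j' + 1 - i) (by omega)
  have hnd' : ¬ (segN l i (j' + 1 - i)).Nodup := by
    intro hnd
    exact hdup (hpre ▸ hnd.sublist (List.take_sublist _ _))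
  simp [goodW, hnd']

theorem foldl_good_const (l : List Int) (i : Nat) (js : List Nat) (res : Int)
    (h : ∀ j' ∈ js, goodW l i j' = false) :
    js.foldl (fun r j' => if goodW l i j' then max r ((j' : Int) - (i : Int) + 1) else r) res
      = res := by
  induction js generalizing res with
  | nil => rfl
  | cons a t ih =>
    rw [List.foldl_cons, if_neg (by rw [h a (List.mem_cons_self)]; simp)]
    exact ih res (fun j' hj' => h j' (List.mem_cons_of_mem a hj'))

theorem innerB_eq (l : List Int) (i : Nat) :
    ∀ (d j : Nat) (seen : PySem.Set Int) (mn mx res : Int), l.length - j = d → i ≤ j →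
    (∀ v : Int, PySem.Set.contains seen v = true ↔ v ∈ segN l i (j - i)) →
    (segN l i (j - i)).Nodup →
    mn = (segN l i (j - i)).foldl min (l.getD i 0) →
    mx = (segN l i (j - i)).foldl max (l.getD i 0) →
    innerB l i j seen mn mx res = (List.range' j (l.length - j)).foldl
      (fun r j' => if goodW l i j' then max r ((j' : Int) - (i : Int) + 1) else r) res := by
  intro d
  induction d with
  | zero =>
    intro j seen mn mx res hd hij hseen hnd hmn hmx
    have hj : ¬ j < l.length := by omega
    rw [innerB, dif_neg hj, hd, List.range'_zero, List.foldl_nil]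
  | succ d ihd =>
    intro j seen mn mx res hd hij hseen hnd hmn hmx
    have hj : j < l.length := by omega
    rw [innerB, dif_pos hj]
    have hwin : segN l i (j - i + 1) = segN l i (j - i) ++ [l.getD j 0] := by
      have := segN_snoc l i (j - i) (by omega)
      rwa [show i + (j - i) = j from by omega] at this
    have hj1i : j + 1 - i = (j - i) + 1 := by omega
    by_cases hc : PySem.Set.contains seen (l.getD j 0) = true
    · simp only [hc, if_true]
      have hvin : l.getD j 0 ∈ segN l i (j - i) := (hseen _).mp hc
      have hdup : ¬ (segN l i (j + 1 - i)).Nodup := by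
        rw [hj1i, hwin]
        intro hnd2
        rw [List.nodup_append] at hnd2
        exact hnd2.2.2 _ hvin _ (List.mem_singleton_self _) rfl
      exact (foldl_good_const l i _ res (fun j' hj' => by
        rw [List.mem_range'_1] at hj'
        exact goodW_false_of_dup l i j j' (by omega) hdup)).symm
    · simp only [hc, Bool.false_eq_true, if_false]
      have hvnot : l.getD j 0 ∉ segN l i (j - i) := fun hmem => hc ((hseen _).mpr hmem)
      have hndnew : (segN l i (j - i + 1)).Nodup := by
        rw [hwin, List.nodup_append]
        refine ⟨hnd, List.nodup_singleton _, ?_⟩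
        intro a ha b hb
        rw [List.mem_singleton] at hb
        subst hb
        intro h
        exact hvnot (h ▸ ha)
      have hmn' : (if l.getD j 0 < mn then l.getD j 0 else mn)
          = (segN l i (j - i + 1)).foldl min (l.getD i 0) := by
        rw [hwin, List.foldl_append, ← hmn, List.foldl_cons, List.foldl_nil, min_def_lt']
      have hmx' : (if mx < l.getD j 0 then l.getD j 0 else mx)
          = (segN l i (j - i + 1)).foldl max (l.getD i 0) := by
        rw [hwin, List.foldl_append, ← hmx, List.foldl_cons, List.foldl_nil, max_def_lt]
      have hgood : goodW l i j =
          ((if mx < l.getD j 0 then l.getD j 0 else mx) -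
           (if l.getD j 0 < mn then l.getD j 0 else mn) == (j : Int) - (i : Int)) := by
        rw [goodW, hj1i, decide_eq_true hndnew, Bool.true_and, hmn', hmx']
      have hrange : List.range' j (l.length - j) =
          j :: List.range' (j + 1) (l.length - (j + 1)) := by
        rw [show l.length - j = (l.length - (j + 1)) + 1 from by omega, List.range'_succ]
      rw [hrange, List.foldl_cons]
      have hseen' : ∀ v : Int, PySem.Set.contains (PySem.Set.add seen (l.getD j 0)) v = true
          ↔ v ∈ segN l i (j + 1 - i) := by
        intro v
        rw [PySem.Set.contains_iff, PySem.Set.mem_add, hj1i, hwin, List.mem_append,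
          List.mem_singleton, ← PySem.Set.contains_iff, hseen]
      rw [ihd (j + 1) _ _ _ _ (by omega) (by omega) hseen'
        (by rw [show j + 1 - i = j - i + 1 from hj1i]; exact hndnew)
        (by rw [show j + 1 - i = j - i + 1 from hj1i]; exact hmn'.symm ▸ rfl)
        (by rw [show j + 1 - i = j - i + 1 from hj1i]; exact hmx'.symm ▸ rfl)]
      congr 1
      rw [hgood]
      simp only [beq_iff_eq]
theorem main_eq (l : List Int) :
    get_longest_integrated_sequence_1 l = get_longest_integrated_sequence_1_alt l := by
  rw [get_longest_integrated_sequence_1, get_longest_integrated_sequence_1_alt]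
  by_cases h0 : l.length = 0
  · rw [if_pos h0, if_pos h0]
  · rw [if_neg h0, if_neg h0]
    apply PySem.List.foldl_congr_mem
    intro res i hi
    rw [List.mem_range] at hi
    have hA : (List.range' i (l.length - i)).foldl
        (fun res j => if valid_integrated_1 l i j then max res ((j : Int) - (i : Int) + 1) else res) res
        = (List.range' i (l.length - i)).foldl
          (fun r j' => if goodW l i j' then max r ((j' : Int) - (i : Int) + 1) else r) res := by
      apply PySem.List.foldl_congr_mem
      intro acc j hj
      rw [List.mem_range'_1] at hj
      rw [valid_iff l i j (by omega) (by omega)]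
    have hB : innerB l i i PySem.Set.empty (l.getD i 0) (l.getD i 0) res
        = (List.range' i (l.length - i)).foldl
          (fun r j' => if goodW l i j' then max r ((j' : Int) - (i : Int) + 1) else r) res := by
      refine innerB_eq l i (l.length - i) i PySem.Set.empty (l.getD i 0) (l.getD i 0) res
        rfl (le_refl i) ?_ ?_ ?_ ?_
      · intro v
        rw [Nat.sub_self, segN_zero, PySem.Set.contains_iff]
        simp [PySem.Set.empty]
      · rw [Nat.sub_self, segN_zero]; exact List.nodup_nil
      · rw [Nat.sub_self, segN_zero]; rfl
      · rw [Nat.sub_self, segN_zero]; rfl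
    rw [hA, ← hB]

-- ===== VERDICT (by name: the statement is the Claim_ definition above) =====
theorem get_longest_integrated_sequence_1_spec : Claim_equal_get_longest_integrated_sequence_1 := by
  intro array _
  unfold Spec_get_longest_integrated_sequence_1
  exact main_eq array
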